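-- pv_equiv track=rewrite | github.com/idqdq/nexus_scrapli_netconf_lab | evpn_data_class.py | xpath2xml
-- ===== SOURCE A (Python) =====
-- def xpath2xml(xpath, xmlns='', operation=None):
--     #transforms xpath like string e.g. "/System/eps-items/epId-items/Ep-list/epId=1/nws-items/vni-items/Nw-list[]/vni=10444"
--     #to xml-like sequence of elements tags:
--     # <System xmlns="http://cisco.com/ns/yang/cisco-nx-os-device">
--     #   <eps-items>
--     #       <epId-items>
--     #           <Ep-list>
--     #               <epId>1</epId>
--     #               <nws-items>
--     #                   <vni-items>
--     #                       <Nw-list operation="remove">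
--     #                           <vni>10444</vni>
--     #                       </Nw-list>
--     #                   </vni-items>
--     #               </nws-items>
--     #           </Ep-list>
--     #       </epId-items>
--     #   </eps-items>
--     # </System>
--     #
--     # it has optional parameter 'operation' that adds the string 'operation="value"' to the element marked with square brackets '[]'
--     # for an nxos the value of the operation can be either "remove" or "replace"
--
--     pl = xpath.split('/')
--
--     xmls = f'<{pl[1]} xmlns="{xmlns}">' if xmlns else f'<{pl[1]}>'
--     xmle = f'</{pl[1]}>'
--
--     def _xpath2xml(pl):
--         key = ''
--         xmls = ''
--         xmle = ''
--         operation_set = ("remove", "replace")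
--
--         for i in range(len(pl)):
--             elem = pl[i]
--             if "=" in elem:
--                 elem,key = elem.split("=")
--                 xmls += f'<{elem}>{key}</{elem}>'
--                 break
--             if "[]" in elem:
--                 elem = elem[:-2]
--                 if operation:
--                     if operation not in operation_set:
--                         raise ValueError(f'Incorrect operation value\nmust be one of the following: {", ".join(operation_set)}')
--                     xmls += f'<{elem} operation="{operation}">'
--                 else:
--                     xmls += f'<{elem}>'
--             else:
--                 xmls += f'<{elem}>'
--             xmle = f'</{elem}>' + xmle
--
--         if key and i < len(pl)-1:
--             return xmls + _xpath2xml(pl[(i+1)::]) + xmle #recursion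
--         else:
--             return xmls + xmle
--
--     return xmls + _xpath2xml(pl[2::]) + xmle
-- ===== SOURCE B (Python) =====
-- def xpath2xml(xpath, xmlns='', operation=None):
--     # Single iterative pass with an explicit stack of closing tags instead of A's
--     # nested recursive helper.
--     pl = xpath.split('/')
--     root = pl[1]
--     parts = [f'<{root} xmlns="{xmlns}">' if xmlns else f'<{root}>']
--     closers = []
--     for elem in pl[2:]:
--         if "=" in elem:
--             tag, _, val = elem.partition("=")
--             parts.append(f'<{tag}>{val}</{tag}>')
--             if not val:  # empty value ends the path (A stops there too)
--                 break
--         else: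
--             if "[]" in elem:
--                 tag = elem[:-2]
--                 if operation:
--                     if operation not in ("remove", "replace"):
--                         raise ValueError('Incorrect operation value\nmust be one of the following: remove, replace')
--                     parts.append(f'<{tag} operation="{operation}">')
--                 else:
--                     parts.append(f'<{tag}>')
--             else:
--                 tag = elem
--                 parts.append(f'<{tag}>')
--             closers.append(f'</{tag}>')
--     parts.extend(reversed(closers))
--     parts.append(f'</{root}>')
--     return ''.join(parts)
-- ===== Notes on version B (the rewrite author's own statement) =====
-- stated objective: simpler
-- what changed: Replaced the nested recursive helper (which rebuilds and re-enters the remaining segment list after every '=' leaf and threads a growing suffix of closing tags through each recursion level) by one flat iterative pass over pl[2:] that appends opening tags/leaves to an output list and keeps pending closing tags on an explicit stack, emitted in reverse after the loop.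
import Mathlib
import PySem

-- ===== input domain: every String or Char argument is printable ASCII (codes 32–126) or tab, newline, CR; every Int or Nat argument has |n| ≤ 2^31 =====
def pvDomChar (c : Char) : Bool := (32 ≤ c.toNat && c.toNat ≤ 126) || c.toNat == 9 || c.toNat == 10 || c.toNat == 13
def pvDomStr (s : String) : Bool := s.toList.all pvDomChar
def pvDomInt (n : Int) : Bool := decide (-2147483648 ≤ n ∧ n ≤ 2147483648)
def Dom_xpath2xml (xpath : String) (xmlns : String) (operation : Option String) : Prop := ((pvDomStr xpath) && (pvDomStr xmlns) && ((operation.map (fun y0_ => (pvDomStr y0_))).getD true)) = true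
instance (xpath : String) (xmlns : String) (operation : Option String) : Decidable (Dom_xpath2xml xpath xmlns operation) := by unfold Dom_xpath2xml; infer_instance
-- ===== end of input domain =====

-- B replaces A's recursive helper by one iterative pass with an explicit stack of closing tags (objective: simpler).

-- ===== PORT A =====

-- elem.split("=") unpacked into (elem, key); Python raises ValueError unless it gives exactly
-- 2 parts (excluded by Pre_) — the fallback value for ≥3 parts is arbitrary
def pvASplitPair (elem : List Char) : List Char × List Char :=
  match PySem.Chars.splitOn elem ['='] with
  | [e, k] => (e, k)
  | parts => (parts.headD [], PySem.Chars.join ['='] parts.tail)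

-- the opening tag emitted by the "[]" branch (elem already truncated); on an operation outside
-- {"remove","replace"} (and ≠ "", which Python treats as falsy) Python raises ValueError —
-- excluded by Pre_, here the attribute is emitted regardless
def pvAOpenBr (operation : Option String) (e : List Char) : List Char :=
  match operation with
  | some op => if op ≠ "" then ['<'] ++ e ++ (" operation=\"".toList) ++ op.toList ++ ['"', '>']
               else ['<'] ++ e ++ ['>']
  | none => ['<'] ++ e ++ ['>']

-- the for-loop of _xpath2xml: state (xmls, xmle); result carries 'some (key, rest)' when the
-- loop broke at an '='-element (rest = the elements after it), 'none' when it ran off the end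
def pvALoop (operation : Option String) : List (List Char) → List Char → List Char →
    (List Char × List Char × Option (List Char × List (List Char)))
  | [], xmls, xmle => (xmls, xmle, none)
  | elem :: rest, xmls, xmle =>
    if PySem.Chars.isIn ['='] elem then
      let p := pvASplitPair elem
      (xmls ++ ['<'] ++ p.1 ++ ['>'] ++ p.2 ++ ['<', '/'] ++ p.1 ++ ['>'], xmle, some (p.2, rest))
    else if PySem.Chars.isIn ['[', ']'] elem then
      pvALoop operation rest (xmls ++ pvAOpenBr operation (PySem.Chars.slice elem none (some (-2))))
        (['<', '/'] ++ PySem.Chars.slice elem none (some (-2)) ++ ['>'] ++ xmle)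
    else
      pvALoop operation rest (xmls ++ ['<'] ++ elem ++ ['>']) (['<', '/'] ++ elem ++ ['>'] ++ xmle)

theorem pvALoop_break_lt (operation : Option String) :
    ∀ (pl : List (List Char)) (xs xe : List Char) (k : List Char) (rest : List (List Char)),
    (pvALoop operation pl xs xe).2.2 = some (k, rest) → rest.length < pl.length := by
  intro pl
  induction pl with
  | nil => intro xs xe k rest h; simp [pvALoop] at h
  | cons e tl ih =>
    intro xs xe k rest h
    simp only [pvALoop] at h
    split at h
    · simp only [Option.some.injEq, Prod.mk.injEq] at h
      rcases h with ⟨-, rfl⟩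
      simp
    · split at h
      · exact Nat.lt_succ_of_lt (ih _ _ _ _ h)
      · exact Nat.lt_succ_of_lt (ih _ _ _ _ h)

-- _xpath2xml: run the loop, then recurse on the remaining elements when the loop broke at a
-- non-empty key and elements remain (i < len(pl)-1 ⟺ rest ≠ [])
def pvARec (operation : Option String) (pl : List (List Char)) : List Char :=
  match h : pvALoop operation pl [] [] with
  | (xmls, xmle, some (key, rest)) =>
    if key ≠ [] ∧ rest ≠ [] then xmls ++ pvARec operation rest ++ xmle else xmls ++ xmle
  | (xmls, xmle, none) => xmls ++ xmle
termination_by pl.length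
decreasing_by exact pvALoop_break_lt operation pl [] [] key rest (by rw [h])

def xpath2xml (xpath : String) (xmlns : String) (operation : Option String) : String :=
  match PySem.Chars.splitOn xpath.toList ['/'] with
  | [] => ""        -- unreachable: split always returns at least one piece
  | [_] => ""       -- pl[1] raises IndexError in Python; excluded by Pre_
  | _ :: p1 :: segs =>
    let xmls := if xmlns ≠ "" then ['<'] ++ p1 ++ (" xmlns=\"".toList) ++ xmlns.toList ++ ['"', '>']
                else ['<'] ++ p1 ++ ['>']
    let xmle := ['<', '/'] ++ p1 ++ ['>']
    String.mk (xmls ++ pvARec operation segs ++ xmle)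

-- ===== PORT B =====

-- elem.partition("="): the piece before the first '=', and the '='-rejoined remainder
-- (exact for every elem; the '=' separator itself is discarded by B)
def pvBPartition (elem : List Char) : List Char × List Char :=
  let parts := PySem.Chars.splitOn elem ['=']
  (parts.headD [], PySem.Chars.join ['='] parts.tail)

-- the opening tag for a "[]"-element (the same f-strings as the Python; Python raises
-- ValueError on a truthy operation outside {"remove","replace"} — excluded by Pre_,
-- here the attribute is emitted regardless)
def pvBOpenTag (operation : Option String) (tag : List Char) : List Char :=
  match operation with
  | some op => if op ≠ "" then ['<'] ++ tag ++ (" operation=\"".toList) ++ op.toList ++ ['"', '>']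
               else ['<'] ++ tag ++ ['>']
  | none => ['<'] ++ tag ++ ['>']

-- B's single for-loop: state (parts, closers); stops early ("break") on an empty value
def pvBLoop (operation : Option String) : List (List Char) → List (List Char) → List (List Char) →
    (List (List Char) × List (List Char))
  | [], parts, closers => (parts, closers)
  | elem :: rest, parts, closers =>
    if PySem.Chars.isIn ['='] elem then
      let p := pvBPartition elem
      let parts' := parts ++ [['<'] ++ p.1 ++ ['>'] ++ p.2 ++ ['<', '/'] ++ p.1 ++ ['>']]
      if p.2 = [] then (parts', closers) else pvBLoop operation rest parts' closers
    else
      let tag := if PySem.Chars.isIn ['[', ']'] elem then PySem.Chars.slice elem none (some (-2)) else elem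
      let opn :=
        if PySem.Chars.isIn ['[', ']'] elem then pvBOpenTag operation tag
        else ['<'] ++ tag ++ ['>']
      pvBLoop operation rest (parts ++ [opn]) (closers ++ [['<', '/'] ++ tag ++ ['>']])

def xpath2xml_alt (xpath : String) (xmlns : String) (operation : Option String) : String :=
  match PySem.Chars.splitOn xpath.toList ['/'] with
  | [] => ""        -- unreachable
  | [_] => ""       -- pl[1] raises IndexError in Python; excluded by Pre_
  | _ :: root :: segs =>
    let rootOpen := if xmlns ≠ "" then ['<'] ++ root ++ (" xmlns=\"".toList) ++ xmlns.toList ++ ['"', '>']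
                    else ['<'] ++ root ++ ['>']
    let st := pvBLoop operation segs [rootOpen] []
    String.mk (PySem.Chars.join [] (st.1 ++ st.2.reverse ++ [['<', '/'] ++ root ++ ['>']]))

-- ===== PRECONDITION & SPEC =====

-- a segment at which A's scan stops: an '='-segment that either has a second '=' (the 2-way
-- unpack of split("=") raises ValueError) or an empty key (the recursion ends there)
def pvStops (s : List Char) : Bool :=
  PySem.Chars.isIn ['='] s && (2 ≤ PySem.Chars.count s ['='] || PySem.Chars.endswith s ['='])

-- Pre_ excludes exactly the inputs on which Python A raises: no '/' in xpath (pl[1] IndexError),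
-- a scanned segment with ≥2 '=' (unpack ValueError), or a truthy operation outside
-- {"remove","replace"} together with a scanned '[]'-segment (explicit ValueError)
def pvSegs (xpath : String) : List (List Char) :=
  (PySem.Chars.splitOn xpath.toList ['/']).drop 2

def pvScan (xpath : String) : List (List Char) :=
  (pvSegs xpath).takeWhile (fun s => !(pvStops s))

-- a truthy operation outside {"remove","replace"}
def pvOpBad (operation : Option String) : Bool :=
  match operation with
  | some op => op != "" && op != "remove" && op != "replace"
  | none => false

-- Pre_ excludes exactly the inputs on which Python A raises: no '/' in xpath (pl[1] IndexError),
-- a scanned segment with >= 2 '=' (the 2-way unpack of split("=") raises ValueError), or a truthy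
-- operation outside {"remove","replace"} together with a scanned '[]'-segment (explicit ValueError)
def Pre_xpath2xml (xpath : String) (xmlns : String) (operation : Option String) : Prop :=
  2 ≤ (PySem.Chars.splitOn xpath.toList ['/']).length ∧
  (∀ s ∈ ((pvSegs xpath).drop (pvScan xpath).length).take 1, PySem.Chars.count s ['='] ≤ 1) ∧
  (pvOpBad operation = true →
   ∀ s ∈ pvScan xpath, PySem.Chars.isIn ['='] s = true ∨ PySem.Chars.isIn ['[', ']'] s = false)

instance (xpath : String) (xmlns : String) (operation : Option String) : Decidable (Pre_xpath2xml xpath xmlns operation) := by unfold Pre_xpath2xml; infer_instance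

def pvWitness_xpath2xml : String × String × Option String := ("/System/eps-items/Ep-list[]/vni=10", "ns", some "remove")

def Spec_xpath2xml (xpath : String) (xmlns : String) (operation : Option String) (out : String) : Prop := out = xpath2xml_alt xpath xmlns operation
instance (xpath : String) (xmlns : String) (operation : Option String) (out : String) : Decidable (Spec_xpath2xml xpath xmlns operation out) := by unfold Spec_xpath2xml; infer_instance

-- ===== CLAIM (what is proved, stated in full; the proofs are below) =====
def Claim_equal_xpath2xml : Prop := ∀ (xpath : String) (xmlns : String) (operation : Option String), Dom_xpath2xml xpath xmlns operation → Pre_xpath2xml xpath xmlns operation → Spec_xpath2xml xpath xmlns operation (xpath2xml xpath xmlns operation)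

-- ===== LEMMAS AND PROOFS =====

theorem pvJoinNilFlatten (xs : List (List Char)) : PySem.Chars.join [] xs = xs.flatten := by
  induction xs with
  | nil => simp [PySem.Chars.join_nil]
  | cons a tl ih =>
    cases tl with
    | nil => simp [PySem.Chars.join_singleton]
    | cons b tl' =>
      rw [PySem.Chars.join_cons_cons]
      simp only [List.flatten_cons, List.nil_append]
      rw [ih]; simp

-- the loop accumulators only prefix (xmls) / suffix (xmle) the final state
theorem pvALoop_acc (operation : Option String) :
    ∀ (pl : List (List Char)) (xs xe xs' xe' : List Char),
    pvALoop operation pl (xs' ++ xs) (xe ++ xe') =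
      ((xs' ++ (pvALoop operation pl xs xe).1 : List Char),
       ((pvALoop operation pl xs xe).2.1 ++ xe' : List Char),
       (pvALoop operation pl xs xe).2.2) := by
  intro pl
  induction pl with
  | nil => intro xs xe xs' xe'; simp [pvALoop]
  | cons e tl ih =>
    intro xs xe xs' xe'
    simp only [pvALoop]
    split
    · simp
    · split
      · rw [List.append_assoc xs' xs _, ← List.append_assoc _ xe xe', ih]
      · rw [show xs' ++ xs ++ ['<'] ++ e ++ ['>'] = xs' ++ (xs ++ ['<'] ++ e ++ ['>']) by simp,
           ← List.append_assoc _ xe xe', ih]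

-- instance with empty accumulators
theorem pvALoop_nil_acc (operation : Option String) (pl : List (List Char)) (xs xe : List Char) :
    pvALoop operation pl xs xe =
      ((xs ++ (pvALoop operation pl [] []).1 : List Char),
       ((pvALoop operation pl [] []).2.1 ++ xe : List Char),
       (pvALoop operation pl [] []).2.2) := by
  simpa using pvALoop_acc operation pl [] [] xs xe

theorem pvBLoop_acc (operation : Option String) :
    ∀ (pl ps cs ps' cs' : List (List Char)),
    pvBLoop operation pl (ps' ++ ps) (cs' ++ cs) =
      ((ps' ++ (pvBLoop operation pl ps cs).1 : List (List Char)),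
       (cs' ++ (pvBLoop operation pl ps cs).2 : List (List Char))) := by
  intro pl
  induction pl with
  | nil => intro ps cs ps' cs'; simp [pvBLoop]
  | cons e tl ih =>
    intro ps cs ps' cs'
    simp only [pvBLoop]
    split
    · split
      · simp
      · rw [List.append_assoc ps' ps _, ih]
    · rw [List.append_assoc ps' ps _, List.append_assoc cs' cs _, ih]

theorem pvBLoop_nil_acc (operation : Option String) (pl ps cs : List (List Char)) :
    pvBLoop operation pl ps cs =
      ((ps ++ (pvBLoop operation pl [] []).1 : List (List Char)),
       (cs ++ (pvBLoop operation pl [] []).2 : List (List Char))) := by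
  simpa using pvBLoop_acc operation pl [] [] ps cs

-- one non-recursive unfolding of pvARec
theorem pvARec_unfold (operation : Option String) (pl : List (List Char)) :
    pvARec operation pl =
      (pvALoop operation pl [] []).1 ++
      (match (pvALoop operation pl [] []).2.2 with
       | some (k, r) => if k ≠ [] ∧ r ≠ [] then pvARec operation r else []
       | none => []) ++
      (pvALoop operation pl [] []).2.1 := by
  rw [pvARec]
  split
  · rename_i xmls xmle key rest heq
    rw [heq]
    by_cases hkr : key ≠ [] ∧ rest ≠ []
    · simp [hkr]
    · simp [hkr]
  · rename_i xmls xmle heq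
    rw [heq]
    simp

theorem pvARec_nil (operation : Option String) : pvARec operation [] = [] := by
  rw [pvARec_unfold]; simp [pvALoop]

-- unfolding pvARec on an '='-element: the loop breaks at once
theorem pvARec_eq (operation : Option String) (e : List Char) (rest : List (List Char))
    (h : PySem.Chars.isIn ['='] e = true) :
    pvARec operation (e :: rest) =
      ['<'] ++ (pvASplitPair e).1 ++ ['>'] ++ (pvASplitPair e).2 ++ ['<', '/'] ++ (pvASplitPair e).1 ++ ['>'] ++
        (if (pvASplitPair e).2 ≠ [] then pvARec operation rest else []) := by
  rw [pvARec_unfold]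
  simp only [pvALoop, h, if_true]
  by_cases hk : (pvASplitPair e).2 = []
  · simp [hk]
  · by_cases hr : rest = []
    · subst hr
      simp [hk, pvARec_nil]
    · simp [hk, hr]

-- unfolding pvARec on a non-'='-element: one tag is opened and closed around the recursion
theorem pvARec_cons (operation : Option String) (e : List Char) (rest : List (List Char))
    (h : PySem.Chars.isIn ['='] e = false) :
    pvARec operation (e :: rest) =
      (if PySem.Chars.isIn ['[', ']'] e then pvAOpenBr operation (PySem.Chars.slice e none (some (-2)))
       else ['<'] ++ e ++ ['>']) ++
      pvARec operation rest ++
      (['<', '/'] ++ (if PySem.Chars.isIn ['[', ']'] e then PySem.Chars.slice e none (some (-2)) else e) ++ ['>']) := by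
  rw [pvARec_unfold, pvARec_unfold operation rest]
  simp only [pvALoop, h, Bool.false_eq_true, if_false]
  by_cases hbr : PySem.Chars.isIn ['[', ']'] e = true <;>
    simp only [hbr, if_true, Bool.false_eq_true, if_false] <;>
    · rw [pvALoop_nil_acc]
      rcases pvALoop operation rest [] [] with ⟨x, xe, _ | ⟨k, r⟩⟩ <;> simp

-- the main correspondence: B's parts/closers state flattens to A's recursive result
theorem pvMain (operation : Option String) :
    ∀ (segs : List (List Char)),
    ((pvBLoop operation segs [] []).1.flatten ++ (pvBLoop operation segs [] []).2.reverse.flatten)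
      = pvARec operation segs := by
  intro segs
  induction segs with
  | nil => rw [pvARec_nil]; simp [pvBLoop]
  | cons e rest ih =>
    by_cases h : PySem.Chars.isIn ['='] e = true
    · rw [pvARec_eq operation e rest h]
      have hsp : pvBPartition e = pvASplitPair e := by
        unfold pvBPartition pvASplitPair
        rcases PySem.Chars.splitOn e ['='] with _ | ⟨a, _ | ⟨b, _ | ⟨c, tl⟩⟩⟩ <;>
          simp [PySem.Chars.join_singleton]
      simp only [pvBLoop, h, if_true, hsp]
      by_cases hk : (pvASplitPair e).2 = []
      · simp [hk]
      · rw [if_neg hk, pvBLoop_nil_acc]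
        simp only [List.flatten_append, List.flatten_cons, List.flatten_nil,
          List.append_nil, List.nil_append, List.singleton_append]
        rw [← ih]; simp [hk]
    · rw [pvARec_cons operation e rest (by simpa using h)]
      have hopen : ∀ (tg : List Char), pvBOpenTag operation tg = pvAOpenBr operation tg :=
        fun _ => rfl
      simp only [pvBLoop, h, Bool.false_eq_true, if_false]
      rw [pvBLoop_nil_acc]
      by_cases hbr : PySem.Chars.isIn ['[', ']'] e = true <;>
        simp only [hbr, if_true, if_false, Bool.false_eq_true, hopen] <;>
        · simp only [List.nil_append, List.flatten_append, List.flatten_cons, List.flatten_nil,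
            List.append_nil, List.reverse_append, List.reverse_cons, List.reverse_nil]
          rw [← ih]; simp

-- ===== VERDICT (by name: the statement is the Claim_ definition above) =====
theorem xpath2xml_spec : Claim_equal_xpath2xml := by
  intro xpath xmlns operation _hdom _hpre
  unfold Spec_xpath2xml xpath2xml xpath2xml_alt
  rcases PySem.Chars.splitOn xpath.toList ['/'] with _ | ⟨p0, _ | ⟨p1, segs⟩⟩
  · rfl
  · rfl
  · simp only
    rw [pvBLoop_nil_acc]
    congr 1
    rw [pvJoinNilFlatten]
    simp only [List.flatten_append, List.flatten_cons, List.flatten_nil, List.append_nil,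
      List.singleton_append, List.nil_append]
    rw [← pvMain operation segs]
    simp
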